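-- pv_equiv track=rewrite | github.com/j019/Coding-Ninjas-Introduction-to-python | Coding Ninjas-Introduction to Python/Arrays & Lists/Find Duplicate.py | duplicateNumber
-- ===== SOURCE A (Python) =====
-- def duplicateNumber(arr, n) :
--         count=0
--         if (n==2):
--                 return (0)
--         else :
--              for i in range(0,len(arr)):
--                 for j in range(i+1,len(arr)):
--                     if arr[i]==0:
--                         continue
--                     elif arr[i]== arr[j]:
--                         count= count +1
--                         return arr[i]
--                         break
-- ===== SOURCE B (Python) =====
-- def duplicateNumber(arr, n):
--     if n == 2:
--         return 0
--     counts = {}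
--     for x in arr:
--         counts[x] = counts.get(x, 0) + 1
--     for x in arr:
--         if x != 0 and counts[x] >= 2:
--             return x
-- ===== Notes on version B (the rewrite author's own statement) =====
-- stated objective: faster
-- what changed: Replaces the O(n^2) nested index scan with one pass building a value->count table plus one forward pass returning the first nonzero element whose count is at least 2.
import Mathlib
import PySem

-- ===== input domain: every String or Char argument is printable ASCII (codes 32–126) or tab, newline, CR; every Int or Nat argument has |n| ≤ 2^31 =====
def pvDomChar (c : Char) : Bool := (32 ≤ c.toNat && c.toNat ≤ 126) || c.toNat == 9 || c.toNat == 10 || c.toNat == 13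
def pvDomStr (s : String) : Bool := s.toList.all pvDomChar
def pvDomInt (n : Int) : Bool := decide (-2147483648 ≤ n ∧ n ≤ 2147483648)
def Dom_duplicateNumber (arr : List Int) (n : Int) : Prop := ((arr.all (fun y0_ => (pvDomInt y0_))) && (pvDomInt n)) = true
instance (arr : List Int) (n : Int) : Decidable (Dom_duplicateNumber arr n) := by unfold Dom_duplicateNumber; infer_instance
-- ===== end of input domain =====

-- B replaces A's quadratic nested index scan by a counting table plus one forward pass (faster).

-- ===== PORT A =====
-- inner loop 'for j in range(i+1, len(arr)): …'; indices i, j always lie in range, so arr[i]/arr[j] is pyGetD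
def dupA_inner (arr : List Int) (i : Int) (js : List Int) : Option Int :=
  match js with
  | [] => none
  | j :: rest =>
    if PySem.List.pyGetD arr i 0 = 0 then dupA_inner arr i rest
    else if PySem.List.pyGetD arr i 0 = PySem.List.pyGetD arr j 0 then
      some (PySem.List.pyGetD arr i 0)
    else dupA_inner arr i rest

-- outer loop 'for i in range(0, len(arr)): …' (the early 'return arr[i]' propagates as 'some')
def dupA_outer (arr : List Int) (is_ : List Int) : Option Int :=
  match is_ with
  | [] => none
  | i :: rest =>
    match dupA_inner arr i (PySem.List.pyRange (i + 1) (arr.length : Int) 1) with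
    | some v => some v
    | none => dupA_outer arr rest

def duplicateNumber (arr : List Int) (n : Int) : Option Int :=
  if n = 2 then some 0
  else dupA_outer arr (PySem.List.pyRange 0 (arr.length : Int) 1)

-- ===== PORT B =====
-- second loop: first x in arr with x ≠ 0 and counts[x] ≥ 2
def dupB_scan (counts : PySem.Dict Int Int) (xs : List Int) : Option Int :=
  match xs with
  | [] => none
  | x :: rest =>
    if x ≠ 0 ∧ counts.getD x 0 ≥ 2 then some x else dupB_scan counts rest

def duplicateNumber_alt (arr : List Int) (n : Int) : Option Int :=
  if n = 2 then some 0
  else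
    -- first loop: counts[x] = counts.get(x, 0) + 1
    dupB_scan (arr.foldl (fun d x => d.modify x 0 (· + 1)) PySem.Dict.empty) arr

-- ===== PRECONDITION & SPEC =====
def Spec_duplicateNumber (arr : List Int) (n : Int) (out : Option Int) : Prop := out = duplicateNumber_alt arr n
instance (arr : List Int) (n : Int) (out : Option Int) : Decidable (Spec_duplicateNumber arr n out) := by unfold Spec_duplicateNumber; infer_instance

-- ===== CLAIM (what is proved, stated in full; the proofs are below) =====
def Claim_equal_duplicateNumber : Prop := ∀ (arr : List Int) (n : Int), Dom_duplicateNumber arr n → Spec_duplicateNumber arr n (duplicateNumber arr n)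

-- ===== LEMMAS AND PROOFS =====

-- the inner loop returns arr[i] iff arr[i] ≠ 0 and arr[i] occurs among the scanned arr[j]
theorem dupA_inner_char (arr : List Int) (i : Int) (js : List Int) :
    dupA_inner arr i js =
      if PySem.List.pyGetD arr i 0 = 0 then none
      else if PySem.List.pyGetD arr i 0 ∈ js.map (fun j => PySem.List.pyGetD arr j 0) then
        some (PySem.List.pyGetD arr i 0)
      else none := by
  induction js with
  | nil => simp [dupA_inner]
  | cons j rest ih =>
    by_cases h0 : PySem.List.pyGetD arr i 0 = 0
    · simp [dupA_inner, ih, h0]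
    · by_cases hj : PySem.List.pyGetD arr i 0 = PySem.List.pyGetD arr j 0
      · have h0' : PySem.List.pyGetD arr j 0 ≠ 0 := hj ▸ h0
        simp [dupA_inner, hj, h0']
      · simp [dupA_inner, ih, h0, hj]

-- main invariant lemma: scanning from index k, with no earlier index holding a later duplicate,
-- the two loops agree
theorem main_inv (arr : List Int) (k : Nat) (hk : k ≤ arr.length)
    (hinv : ∀ j, j < k → ¬ (arr.getD j 0 ≠ 0 ∧ arr.getD j 0 ∈ arr.drop (j + 1))) :
    dupA_outer arr (PySem.List.pyRange (k : Int) (arr.length : Int) 1) =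
      dupB_scan (arr.foldl (fun d x => d.modify x 0 (· + 1)) PySem.Dict.empty) (arr.drop k) := by
  induction hfuel : arr.length - k generalizing k with
  | zero =>
    have hk' : k = arr.length := by omega
    subst hk'
    rw [PySem.List.pyRange_one_eq_nil (by exact_mod_cast le_refl _)]
    simp [dupA_outer, dupB_scan]
  | succ m ih =>
    have hklt : k < arr.length := by omega
    rw [PySem.List.pyRange_one_cons (by exact_mod_cast hklt)]
    simp only [dupA_outer]
    rw [dupA_inner_char]
    have hget : PySem.List.pyGetD arr (k : Int) 0 = arr[k] := by
      rw [PySem.List.pyGetD_natCast, List.getD_eq_getElem _ _ hklt]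
    have hmap : (PySem.List.pyRange ((k : Int) + 1) (arr.length : Int) 1).map
        (fun j => PySem.List.pyGetD arr j 0) = arr.drop (k + 1) := by
      have := PySem.List.map_pyGetD_pyRange' arr (a := (k : Int) + 1) (d := 0) (by positivity)
      simpa using this
    have hdrop : arr.drop k = arr[k] :: arr.drop (k + 1) := List.drop_eq_getElem_cons hklt
    have hcount : ∀ x : Int,
        (arr.foldl (fun d y => d.modify y 0 (· + 1)) PySem.Dict.empty).getD x 0 =
          (arr.count x : Int) := by
      intro x
      have := PySem.Dict.getD_foldl_modify_add_one (l := arr) (d := PySem.Dict.empty) (v := x)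
      simpa using this
    have hsplit : ∀ x : Int,
        arr.count x = (arr.take (k + 1)).count x + (arr.drop (k + 1)).count x := by
      intro x
      conv_lhs => rw [← List.take_append_drop (k + 1) arr]
      exact List.count_append ..
    rw [hdrop]
    simp only [dupB_scan, hget, hmap, hcount]
    by_cases hP : arr[k] ≠ 0 ∧ arr[k] ∈ arr.drop (k + 1)
    · -- both loops stop here and return arr[k]
      obtain ⟨hx0, hxmem⟩ := hP
      have hc2 : 2 ≤ (arr.count arr[k] : Int) := by
        have hsplit := hsplit arr[k]
        have h1 : 1 ≤ (arr.take (k + 1)).count arr[k] := by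
          refine List.one_le_count_iff.mpr ?_
          have hlt : k < (arr.take (k + 1)).length := by simp; omega
          have h : (arr.take (k + 1))[k]'hlt = arr[k] := List.getElem_take
          exact h ▸ List.getElem_mem hlt
        have h2 : 1 ≤ (arr.drop (k + 1)).count arr[k] := List.one_le_count_iff.mpr hxmem
        have : 2 ≤ arr.count arr[k] := by omega
        exact_mod_cast this
      simp [hx0, hxmem, hc2]
    · -- both loops continue; extend the invariant and use the induction hypothesis
      have hnotB : ¬ (arr[k] ≠ 0 ∧ 2 ≤ (arr.count arr[k] : Int)) := by
        rintro ⟨hx0, hc2⟩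
        apply hP
        refine ⟨hx0, ?_⟩
        by_contra hnd
        -- no later occurrence, so two occurrences sit in arr.take (k+1), hence one before k
        have hcd : (arr.drop (k + 1)).count arr[k] = 0 :=
          List.count_eq_zero.mpr hnd
        have hsplit := hsplit arr[k]
        have htake : 2 ≤ (arr.take (k + 1)).count arr[k] := by
          have : (2 : Nat) ≤ arr.count arr[k] := by exact_mod_cast hc2
          omega
        have htk : arr.take (k + 1) = arr.take k ++ [arr[k]] := by
          rw [List.take_add_one, List.getElem?_eq_getElem hklt]
          simp
        have hpre : 1 ≤ (arr.take k).count arr[k] := by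
          have h1 : (arr.take (k + 1)).count arr[k] = (arr.take k).count arr[k] + 1 := by
            rw [htk, List.count_append]; simp
          omega
        have hmem : arr[k] ∈ arr.take k := List.one_le_count_iff.mp hpre
        obtain ⟨j, hj, hje⟩ := List.getElem_of_mem hmem
        have hjk : j < k := by
          have := hj; simp at this; omega
        have hjlen : j < arr.length := by omega
        have hje' : arr[j] = arr[k] := by
          have h : (arr.take k)[j]'hj = arr[j]'hjlen := List.getElem_take
          rw [← h]; exact hje
        refine hinv j hjk ?_
        have hgd : arr.getD j 0 = arr[j] := List.getD_eq_getElem _ _ hjlen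
        refine ⟨by rw [hgd, hje']; exact hx0, ?_⟩
        rw [hgd, hje']
        have hidx : k - (j + 1) < (arr.drop (j + 1)).length := by simp; omega
        have : (arr.drop (j + 1))[k - (j + 1)] = arr[k] := by
          rw [List.getElem_drop]
          congr 1
          omega
        exact this ▸ List.getElem_mem hidx
      have hnotA : ¬ (arr[k] ≠ 0 ∧ arr[k] ∈ arr.drop (k + 1)) := hP
      have hinv' : ∀ j, j < k + 1 → ¬ (arr.getD j 0 ≠ 0 ∧ arr.getD j 0 ∈ arr.drop (j + 1)) := by
        intro j hj
        rcases Nat.lt_or_ge j k with h | h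
        · exact hinv j h
        · have hjk : j = k := by omega
          subst hjk
          rw [List.getD_eq_getElem _ _ hklt]
          exact hP
      have hrec := ih (k + 1) (by omega) hinv' (by omega)
      have hcast : ((k : Int) + 1) = ((k + 1 : Nat) : Int) := by push_cast; ring
      rw [hcast]
      by_cases hx0 : arr[k] = 0
      · simpa [hx0] using hrec
      · have hnc : ¬ (2 ≤ (arr.count arr[k] : Int)) := fun h => hnotB ⟨hx0, h⟩
        have hnm : arr[k] ∉ arr.drop (k + 1) := fun h => hnotA ⟨hx0, h⟩
        simpa [hx0, hnm, hnc] using hrec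

theorem duplicateNumber_spec : Claim_equal_duplicateNumber := by
  intro arr n _
  unfold Spec_duplicateNumber duplicateNumber duplicateNumber_alt
  by_cases h2 : n = 2
  · simp [h2]
  · simp only [h2, if_false]
    have := main_inv arr 0 (Nat.zero_le _) (by intro j hj; omega)
    simpa using this
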